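-- pv_equiv track=rewrite | github.com/COMP115-Bravo/comp115 | lab10_kulwinder kaur.py | more_than_2
-- ===== SOURCE A (Python) =====
-- def more_than_2(words):
--     word_count = {}
--     for word in words:
--         if word in word_count:
--             word_count[word] += 1
--         else:
--             word_count[word] = 1
--
--     result = []
--     for word, count in word_count.items():
--         if count > 2:
--             result.append(word)
--
--     return result
-- ===== SOURCE B (Python) =====
-- def more_than_2(words):
--     result = []
--     for word in words:
--         if words.count(word) > 2 and word not in result:
--             result.append(word)
--     return result
-- ===== Notes on version B (the rewrite author's own statement) =====
-- stated objective: simpler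
-- what changed: Drops the frequency dictionary: a single scan that recounts each word with words.count and appends it when the total exceeds 2 and it is not already in the result, preserving first-appearance order.
import Mathlib
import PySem

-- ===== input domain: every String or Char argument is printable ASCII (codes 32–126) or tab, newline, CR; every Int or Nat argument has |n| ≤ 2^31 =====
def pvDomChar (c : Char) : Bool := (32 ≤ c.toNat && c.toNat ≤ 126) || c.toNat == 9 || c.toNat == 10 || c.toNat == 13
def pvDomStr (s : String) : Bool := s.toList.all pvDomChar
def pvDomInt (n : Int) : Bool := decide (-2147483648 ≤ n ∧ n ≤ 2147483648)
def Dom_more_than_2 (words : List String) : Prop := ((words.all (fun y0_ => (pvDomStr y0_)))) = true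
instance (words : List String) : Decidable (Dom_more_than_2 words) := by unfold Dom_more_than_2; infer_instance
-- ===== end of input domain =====

-- B replaces A's frequency dictionary by a single scan that recounts each word with words.count; equal output, no speed claim.

-- ===== PORT A =====
def more_than_2 (words : List String) : List String :=
  (words.foldl (fun d word =>
      if d.contains word then d.insert word (d.getD word 0 + 1)
      else d.insert word 1) (PySem.Dict.empty : PySem.Dict String Int)).items.foldl
    (fun result kv => if kv.2 > 2 then result ++ [kv.1] else result) []

-- ===== PORT B =====
def more_than_2_alt (words : List String) : List String :=
  words.foldl (fun result word =>
    if 2 < PySem.List.count words word ∧ word ∉ result then result ++ [word] else result) []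

-- ===== PRECONDITION & SPEC =====
def Spec_more_than_2 (words : List String) (out : List String) : Prop := out = more_than_2_alt words
instance (words : List String) (out : List String) : Decidable (Spec_more_than_2 words out) := by unfold Spec_more_than_2; infer_instance

-- ===== CLAIM (what is proved, stated in full; the proofs are below) =====
def Claim_equal_more_than_2 : Prop := ∀ (words : List String), Dom_more_than_2 words → Spec_more_than_2 words (more_than_2 words)

-- ===== LEMMAS AND PROOFS =====

-- One step of B's loop, when the accumulator is the filtered set so far, extends the set.
theorem b_step (p : String → Prop) [DecidablePred p] (s : PySem.Set String) (w : String) :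
    (if p w ∧ w ∉ s.filter (fun x => decide (p x)) then s.filter (fun x => decide (p x)) ++ [w]
     else s.filter (fun x => decide (p x)))
      = (PySem.Set.add s w).filter (fun x => decide (p x)) := by
  by_cases hp : p w <;> by_cases hm : w ∈ s <;>
    simp [PySem.Set.add, hm, List.mem_filter, hp, List.filter_append]

-- B's loop computes the p-filter of the ordered set of words seen so far.
theorem b_loop (p : String → Prop) [DecidablePred p] :
    ∀ (l : List String) (s : PySem.Set String),
      l.foldl (fun acc w => if p w ∧ w ∉ acc then acc ++ [w] else acc)
        (s.filter (fun x => decide (p x)))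
        = (PySem.Set.update s l).filter (fun x => decide (p x)) := by
  intro l
  induction l with
  | nil => intro s; rfl
  | cons w l ih =>
      intro s
      have h := b_step p s w
      simp only [List.foldl_cons, h, PySem.Set.update, List.foldl_cons]
      exact ih (PySem.Set.add s w)

-- ===== VERDICT (by name: the statement is the Claim_ definition above) =====
theorem more_than_2_spec : Claim_equal_more_than_2 := by
  unfold Claim_equal_more_than_2
  intro words _
  unfold Spec_more_than_2 more_than_2 more_than_2_alt
  have hstep : (fun (d : PySem.Dict String Int) (word : String) =>
      if d.contains word then d.insert word (d.getD word 0 + 1)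
      else d.insert word 1)
      = (fun d word => d.insert word (d.getD word 0 + 1)) := by
    funext d word
    by_cases h : d.contains word = true
    · simp [h]
    · simp only [Bool.not_eq_true] at h
      rw [if_neg (by simp [h]), PySem.Dict.getD_of_not_contains d (0 : Int) h]
      norm_num
  rw [hstep, PySem.Dict.foldl_insert_getD_add_one_eq_counter, PySem.Dict.items_counter,
      List.foldl_map]
  have hB := b_loop (fun w => 2 < PySem.List.count words w) words []
  simp only [List.filter_nil] at hB
  rw [hB]
  have hA := PySem.List.foldl_append_ite_eq_filter
      (p := fun (k : String) => ((words.count k : Int) > 2))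
      (l := PySem.Set.ofList words) (acc := ([] : List String))
  simp only [List.nil_append] at hA
  rw [hA]
  have hupd : PySem.Set.update ([] : PySem.Set String) words = PySem.Set.ofList words := rfl
  rw [hupd]
  apply List.filter_congr
  intro x _
  simp [PySem.List.count]
  try omega
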